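-- pv_equiv track=rewrite | github.com/lucashutch/limitwatch | src/limitwatch/cli.py | _apply_cli_query
-- ===== SOURCE A (Python) =====
-- def _apply_cli_query(quotas, query):
--     """Apply the CLI --query filter to a list of quota dicts."""
--     if not query:
--         return quotas
--     for q_str in query:
--         q_lower = q_str.lower()
--         quotas = [
--             q
--             for q in quotas
--             if q_lower in q.get("name", "").lower()
--             or q_lower in q.get("display_name", "").lower()
--         ]
--     return quotas
-- ===== SOURCE B (Python) =====
-- def _apply_cli_query(quotas, query):
--     """Apply the CLI --query filter to a list of quota dicts."""
--     lowered = [s.lower() for s in query]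
--
--     def keep(name, disp):
--         for ql in lowered:
--             if ql not in name and ql not in disp:
--                 return False
--         return True
--
--     out = []
--     for q in quotas:
--         if keep(q.get("name", "").lower(), q.get("display_name", "").lower()):
--             out.append(q)
--     return out
-- ===== Notes on version B (the rewrite author's own statement) =====
-- stated objective: simpler
-- what changed: Instead of A's one full filter pass (building an intermediate list) per query string with the two dict fields re-fetched and re-lowered on every pass, B lowers each quota's name/display_name once, then a single accumulator loop over quotas keeps a quota iff an inner early-exit scan finds no non-matching query; the empty-query guard disappears (vacuous inner scan).
import Mathlib
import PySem

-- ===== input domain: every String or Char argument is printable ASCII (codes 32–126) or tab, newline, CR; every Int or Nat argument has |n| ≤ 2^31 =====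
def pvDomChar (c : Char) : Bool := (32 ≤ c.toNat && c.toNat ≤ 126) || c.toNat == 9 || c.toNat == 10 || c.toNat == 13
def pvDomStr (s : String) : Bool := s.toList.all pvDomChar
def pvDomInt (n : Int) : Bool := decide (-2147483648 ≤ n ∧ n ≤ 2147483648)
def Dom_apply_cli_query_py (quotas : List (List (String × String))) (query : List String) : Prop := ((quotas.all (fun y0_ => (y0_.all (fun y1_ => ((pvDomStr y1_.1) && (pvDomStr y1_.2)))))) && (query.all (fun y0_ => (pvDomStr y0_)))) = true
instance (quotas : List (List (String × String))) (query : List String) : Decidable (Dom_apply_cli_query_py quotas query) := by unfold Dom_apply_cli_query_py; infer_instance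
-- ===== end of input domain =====

-- B replaces A's one-filter-pass-per-query-string loop (which re-fetches and re-lowers both
-- dict fields on every pass) by a single accumulator recursion over quotas that lowers each
-- quota's two fields once and scans the lowered queries with an early-exit check; objective: simpler.

-- ===== PORT A =====
def apply_cli_query_py (quotas : List (List (String × String))) (query : List String) : List (List (String × String)) :=
  if query = [] then quotas
  else
    query.foldl (fun qs q_str =>
      let q_lower := PySem.Str.lower q_str
      qs.filter (fun q =>
        PySem.Str.isIn q_lower (PySem.Str.lower ((PySem.Dict.mk q).getD "name" "")) ||
        PySem.Str.isIn q_lower (PySem.Str.lower ((PySem.Dict.mk q).getD "display_name" "")))) quotas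

-- ===== PORT B =====
-- inner early-exit scan of Source B's `keep`: false as soon as some query matches neither field
def pvKeep (lowered : List String) (name disp : String) : Bool :=
  match lowered with
  | [] => true
  | ql :: rest =>
    if !PySem.Str.isIn ql name && !PySem.Str.isIn ql disp then false
    else pvKeep rest name disp

-- Source B's accumulator loop over quotas (output built by structural recursion)
def pvGo (lowered : List String) : List (List (String × String)) → List (List (String × String))
  | [] => []
  | q :: rest =>
    if pvKeep lowered (PySem.Str.lower ((PySem.Dict.mk q).getD "name" ""))
               (PySem.Str.lower ((PySem.Dict.mk q).getD "display_name" "")) then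
      q :: pvGo lowered rest
    else pvGo lowered rest

def apply_cli_query_py_alt (quotas : List (List (String × String))) (query : List String) : List (List (String × String)) :=
  pvGo (query.map PySem.Str.lower) quotas

-- ===== PRECONDITION & SPEC =====
def Spec_apply_cli_query_py (quotas : List (List (String × String))) (query : List String) (out : List (List (String × String))) : Prop := out = apply_cli_query_py_alt quotas query
instance (quotas : List (List (String × String))) (query : List String) (out : List (List (String × String))) : Decidable (Spec_apply_cli_query_py quotas query out) := by unfold Spec_apply_cli_query_py; infer_instance

-- ===== CLAIM (what is proved, stated in full; the proofs are below) =====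
def Claim_equal_apply_cli_query_py : Prop := ∀ (quotas : List (List (String × String))) (query : List String), Dom_apply_cli_query_py quotas query → Spec_apply_cli_query_py quotas query (apply_cli_query_py quotas query)

-- ===== LEMMAS AND PROOFS =====

-- the early-exit scan decides the conjunction of the per-query matches
theorem pvKeep_eq_all (name disp : String) :
    ∀ lowered : List String,
      pvKeep lowered name disp =
        lowered.all (fun ql => PySem.Str.isIn ql name || PySem.Str.isIn ql disp) := by
  intro lowered
  induction lowered with
  | nil => rfl
  | cons ql rest ih =>
    simp only [pvKeep, List.all_cons, ih]
    by_cases h1 : PySem.Str.isIn ql name <;> by_cases h2 : PySem.Str.isIn ql disp <;>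
      simp

-- the accumulator recursion is a filter by pvKeep
theorem pvGo_eq_filter (lowered : List String) :
    ∀ qs : List (List (String × String)),
      pvGo lowered qs =
        qs.filter (fun q =>
          pvKeep lowered (PySem.Str.lower ((PySem.Dict.mk q).getD "name" ""))
                 (PySem.Str.lower ((PySem.Dict.mk q).getD "display_name" ""))) := by
  intro qs
  induction qs with
  | nil => rfl
  | cons q rest ih => simp only [pvGo, ih, List.filter_cons]

-- successive filter passes = one filter with the conjunction of all the tests
theorem foldl_filter_eq_filter_all {α β : Type} (p : β → α → Bool) :
    ∀ (l : List β) (xs : List α),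
      l.foldl (fun acc b => acc.filter (p b)) xs = xs.filter (fun x => l.all (fun b => p b x)) := by
  intro l
  induction l with
  | nil => intro xs; simp
  | cons b t ih =>
    intro xs
    simp only [List.foldl_cons, ih, List.filter_filter, List.all_cons]
    congr 1
    funext x
    rw [Bool.and_comm]

-- ===== VERDICT (by name: the statement is the Claim_ definition above) =====
theorem apply_cli_query_py_spec : Claim_equal_apply_cli_query_py := by
  intro quotas query _
  unfold Spec_apply_cli_query_py apply_cli_query_py apply_cli_query_py_alt
  rw [pvGo_eq_filter]
  rcases query with _ | ⟨h, t⟩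
  · simp [pvKeep]
  · simp only [if_neg (List.cons_ne_nil h t)]
    rw [foldl_filter_eq_filter_all]
    congr 1
    funext q
    rw [pvKeep_eq_all]
    simp [List.all_map, Function.comp_def]
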